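-- pv_equiv track=rewrite | github.com/or-m-or/KT-AIVLE-School-5th_Codingmasters | example/round2/Advanced/Q8766_작곡프로그램/A8766.py | solution
-- ===== SOURCE A (Python) =====
-- def is_valid(seq, banned, max_consec):
--     # Check if the sequence contains any banned sequence
--     for i in range(len(seq) - 1):
--         if (seq[i], seq[i + 1]) in banned:
--             return False
--
--     # Check for consecutive major or minor chords
--     major_count = 0
--     minor_count = 0
--     for chord in seq:
--         if chord.endswith('m'):
--             minor_count += 1
--             major_count = 0
--         else:
--             major_count += 1
--             minor_count = 0
--         if major_count > max_consec or minor_count > max_consec: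
--             return False
--
--     return True
--
-- def solution(banned_seqs, max_consec):
--     chords = ["A", "B", "C", "D", "E", "F", "G", "Am", "Bm", "Cm", "Dm", "Em", "Fm", "Gm"]
--     banned_set = set(tuple(seq.split()) for seq in banned_seqs)
--
--     def backtrack(seq):
--         if len(seq) == 5:
--             return 1
--
--         count = 0
--         for chord in chords:
--             if chord not in seq:
--                 seq.append(chord)
--                 if is_valid(seq, banned_set, max_consec):
--                     count += backtrack(seq)
--                 seq.pop()
--         return count
--
--     return backtrack([])
-- ===== SOURCE B (Python) =====
-- def solution(banned_seqs, max_consec):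
--     chords = ["A", "B", "C", "D", "E", "F", "G", "Am", "Bm", "Cm", "Dm", "Em", "Fm", "Gm"]
--     banned_pairs = set()
--     for s in banned_seqs:
--         parts = s.split()
--         if len(parts) == 2:
--             banned_pairs.add((parts[0], parts[1]))
--
--     def backtrack(seq, last, run):
--         if len(seq) == 5:
--             return 1
--         total = 0
--         for chord in chords:
--             if chord in seq:
--                 continue
--             if last is not None and (last, chord) in banned_pairs:
--                 continue
--             if last is not None and chord.endswith('m') == last.endswith('m'):
--                 new_run = run + 1
--             else:
--                 new_run = 1
--             if new_run > max_consec: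
--                 continue
--             total += backtrack(seq + [chord], chord, new_run)
--         return total
--
--     return backtrack([], None, 0)
-- ===== Notes on version B (the rewrite author's own statement) =====
-- stated objective: alternative
-- what changed: A re-validates the whole prefix at every extension (rescanning all adjacent pairs and recomputing the consecutive major/minor counters from scratch); B threads incremental state (last chord placed and current same-type run length) through the recursion, so each candidate chord is checked with a single banned-pair lookup and one run-length comparison.
import Mathlib
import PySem

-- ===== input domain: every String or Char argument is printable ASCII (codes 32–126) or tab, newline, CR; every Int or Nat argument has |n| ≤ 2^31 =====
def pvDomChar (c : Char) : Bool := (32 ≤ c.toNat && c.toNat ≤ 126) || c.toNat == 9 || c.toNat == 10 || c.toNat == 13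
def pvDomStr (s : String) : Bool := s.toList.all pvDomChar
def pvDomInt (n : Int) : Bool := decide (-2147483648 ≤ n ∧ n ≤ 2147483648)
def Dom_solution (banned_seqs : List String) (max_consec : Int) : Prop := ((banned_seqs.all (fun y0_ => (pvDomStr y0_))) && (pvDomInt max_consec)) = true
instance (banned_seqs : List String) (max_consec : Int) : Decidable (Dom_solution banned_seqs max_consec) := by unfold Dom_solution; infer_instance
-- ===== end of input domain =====

-- B replaces A's per-step full rescan of the prefix (is_valid) by incremental state threaded
-- through the recursion (last chord placed and current same-type run length): simpler per-step check.

-- ===== PORT A =====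
def pvChordsA : List String := ["A", "B", "C", "D", "E", "F", "G", "Am", "Bm", "Cm", "Dm", "Em", "Fm", "Gm"]

-- for i in range(len(seq)-1): if (seq[i], seq[i+1]) in banned: return False
def pairsOkA (banned : PySem.Set (List String)) : List String → Bool
  | a :: b :: rest => if [a, b] ∈ banned then false else pairsOkA banned (b :: rest)
  | _ => true

-- the major_count/minor_count loop of is_valid, with its early 'return False'
def runLoopA (maxc : Int) : Int → Int → List String → Bool
  | _, _, [] => true
  | maj, mnr, c :: rest =>
    let s := if PySem.Str.endswith c "m" then ((0 : Int), mnr + 1) else (maj + 1, (0 : Int))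
    if s.1 > maxc ∨ s.2 > maxc then false else runLoopA maxc s.1 s.2 rest

def isValidA (seq : List String) (banned : PySem.Set (List String)) (maxc : Int) : Bool :=
  pairsOkA banned seq && runLoopA maxc 0 0 seq

-- backtrack(seq); the fuel argument is 5 - len(seq)
def backtrackA (banned : PySem.Set (List String)) (maxc : Int) : Nat → List String → Int
  | 0, _ => 1
  | n + 1, seq =>
    pvChordsA.foldl (fun cnt c =>
      if c ∈ seq then cnt
      else if isValidA (seq ++ [c]) banned maxc then cnt + backtrackA banned maxc n (seq ++ [c])
      else cnt) 0

def solution (banned_seqs : List String) (max_consec : Int) : Int :=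
  backtrackA (PySem.Set.ofList (banned_seqs.map PySem.Str.split₀)) max_consec 5 []

-- ===== PORT B =====
def pvChordsB : List String := ["A", "B", "C", "D", "E", "F", "G", "Am", "Bm", "Cm", "Dm", "Em", "Fm", "Gm"]

def pvBannedPairsB (banned_seqs : List String) : PySem.Set (String × String) :=
  banned_seqs.foldl (fun s t =>
    match PySem.Str.split₀ t with
    | [a, b] => PySem.Set.add s (a, b)
    | _ => s) PySem.Set.empty

-- backtrack(seq, last, run); the fuel argument is 5 - len(seq)
def backtrackB (banned : PySem.Set (String × String)) (maxc : Int) :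
    Nat → List String → Option String → Int → Int
  | 0, _, _, _ => 1
  | n + 1, seq, last, run =>
    pvChordsB.foldl (fun tot c =>
      if c ∈ seq then tot
      else if (match last with | some l => decide ((l, c) ∈ banned) | none => false) then tot
      else
        let newRun : Int := match last with
          | some l => if PySem.Str.endswith c "m" == PySem.Str.endswith l "m" then run + 1 else 1
          | none => 1
        if newRun > maxc then tot
        else tot + backtrackB banned maxc n (seq ++ [c]) (some c) newRun) 0

def solution_alt (banned_seqs : List String) (max_consec : Int) : Int :=
  backtrackB (pvBannedPairsB banned_seqs) max_consec 5 [] none 0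

-- ===== PRECONDITION & SPEC =====
def Spec_solution (banned_seqs : List String) (max_consec : Int) (out : Int) : Prop := out = solution_alt banned_seqs max_consec
instance (banned_seqs : List String) (max_consec : Int) (out : Int) : Decidable (Spec_solution banned_seqs max_consec out) := by unfold Spec_solution; infer_instance

-- ===== CLAIM (what is proved, stated in full; the proofs are below) =====
def Claim_equal_solution : Prop := ∀ (banned_seqs : List String) (max_consec : Int), Dom_solution banned_seqs max_consec → Spec_solution banned_seqs max_consec (solution banned_seqs max_consec)

-- ===== LEMMAS AND PROOFS =====

-- A's counter loop, returning the final (major_count, minor_count) (none = early return False)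
def runStateA (maxc : Int) : Int → Int → List String → Option (Int × Int)
  | maj, mnr, [] => some (maj, mnr)
  | maj, mnr, c :: rest =>
    let s := if PySem.Str.endswith c "m" then ((0 : Int), mnr + 1) else (maj + 1, (0 : Int))
    if s.1 > maxc ∨ s.2 > maxc then none else runStateA maxc s.1 s.2 rest

theorem runLoopA_eq_isSome (maxc : Int) (l : List String) : ∀ maj mnr,
    runLoopA maxc maj mnr l = (runStateA maxc maj mnr l).isSome := by
  induction l with
  | nil => intro maj mnr; rfl
  | cons c rest ih =>
    intro maj mnr
    simp only [runLoopA, runStateA]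
    split <;> split <;> first | rfl | exact ih _ _

theorem runStateA_append (maxc : Int) (c : String) (l : List String) : ∀ maj mnr,
    runStateA maxc maj mnr (l ++ [c]) = (runStateA maxc maj mnr l).bind (fun p =>
      let s := if PySem.Str.endswith c "m" then ((0 : Int), p.2 + 1) else (p.1 + 1, (0 : Int))
      if s.1 > maxc ∨ s.2 > maxc then none else some s) := by
  induction l with
  | nil =>
    intro maj mnr
    simp only [List.nil_append, runStateA, Option.bind_some]
  | cons d rest ih =>
    intro maj mnr
    simp only [List.cons_append, runStateA]
    split <;> split <;> first | rfl | exact ih _ _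

theorem pairsOkA_append (banned : PySem.Set (List String)) (c : String) (l : List String) :
    pairsOkA banned (l ++ [c]) =
      (pairsOkA banned l && (match l.getLast? with
        | none => true
        | some x => !decide ([x, c] ∈ banned))) := by
  induction l with
  | nil => rfl
  | cons a rest ih =>
    cases rest with
    | nil =>
      simp only [List.cons_append, List.nil_append, pairsOkA]
      split_ifs <;> simp_all [pairsOkA]
    | cons b rest' =>
      simp only [List.cons_append, pairsOkA, List.getLast?_cons_cons] at *
      split_ifs with h
      · simp
      · rw [ih]

-- the (major_count, minor_count) pair that B's (last, run) state represents
def stateOfB (last : Option String) (run : Int) : Int × Int :=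
  match last with
  | none => ((0 : Int), (0 : Int))
  | some l => if PySem.Str.endswith l "m" then ((0 : Int), run) else (run, (0 : Int))

theorem mem_pvBannedPairsB (banned_seqs : List String) (l c : String) :
    ((l, c) ∈ pvBannedPairsB banned_seqs) ↔ [l, c] ∈ banned_seqs.map PySem.Str.split₀ := by
  suffices h : ∀ (bs : List String) (s : PySem.Set (String × String)),
      ((l, c) ∈ bs.foldl (fun s t =>
        match PySem.Str.split₀ t with
        | [a, b] => PySem.Set.add s (a, b)
        | _ => s) s) ↔ ((l, c) ∈ s ∨ [l, c] ∈ bs.map PySem.Str.split₀) by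
    rw [pvBannedPairsB, h]
    simp [PySem.Set.empty]
  intro bs
  induction bs with
  | nil => intro s; simp
  | cons t rest ih =>
    intro s
    simp only [List.foldl_cons, List.map_cons, List.mem_cons, ih]
    rcases hsp : PySem.Str.split₀ t with _ | ⟨a, _ | ⟨b, _ | _⟩⟩ <;>
      simp [PySem.Set.mem_add] <;> aesop

theorem foldl_ext {α β : Type} (f g : α → β → α) (a : α) (l : List β)
    (h : ∀ x y, f x y = g x y) : l.foldl f a = l.foldl g a := by
  have : f = g := funext fun x => funext fun y => h x y
  rw [this]

theorem pvChordsB_eq : pvChordsB = pvChordsA := rfl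

theorem backtrack_eq (banned_seqs : List String) (maxc : Int) :
    ∀ (n : Nat) (seq : List String) (last : Option String) (run : Int),
    pairsOkA (PySem.Set.ofList (banned_seqs.map PySem.Str.split₀)) seq = true →
    runStateA maxc 0 0 seq = some (stateOfB last run) →
    seq.getLast? = last →
    (∀ l, last = some l → 1 ≤ run) →
    backtrackA (PySem.Set.ofList (banned_seqs.map PySem.Str.split₀)) maxc n seq =
      backtrackB (pvBannedPairsB banned_seqs) maxc n seq last run := by
  intro n
  induction n with
  | zero => intro seq last run _ _ _ _; rfl
  | succ n ih =>
    intro seq last run hpairs hrs hlast hrun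
    simp only [backtrackA, backtrackB, pvChordsB_eq]
    apply foldl_ext
    intro acc c
    by_cases hc : c ∈ seq
    · simp only [if_pos hc]
    · simp only [if_neg hc]
      cases last with
      | none =>
        rw [isValidA, pairsOkA_append, hpairs, Bool.true_and, runLoopA_eq_isSome,
          runStateA_append, hrs, hlast]
        have hseq : seq.getLast? = none := hlast
        simp only [stateOfB, Option.bind_some, Bool.true_and]
        cases hec : PySem.Chars.endswith c.toList ['m'] <;> by_cases hgt : (1 : Int) > maxc
        · -- c major, 1 > maxc: both reject
          simp [hec, hgt, show maxc < 0 + 1 by omega]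
        · -- c major, 1 ≤ maxc: both recurse
          have hrec := ih (seq ++ [c]) (some c) 1
            (by rw [pairsOkA_append, hpairs, hseq]; rfl)
            (by rw [runStateA_append, hrs]
                simp [stateOfB, hec, show ¬ maxc < 0 + 1 by omega, show ¬ maxc < 0 by omega,
                  show ¬ maxc ≤ 0 by omega])
            (by simp) (by intro _ _; omega)
          simp [hec, hgt, hrec, show ¬ maxc < 0 + 1 by omega, show ¬ maxc < 0 by omega,
            show ¬ maxc ≤ 0 by omega]
        · -- c minor, 1 > maxc: both reject
          simp [hec, hgt, show maxc < 0 + 1 by omega]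
        · -- c minor, 1 ≤ maxc: both recurse
          have hrec := ih (seq ++ [c]) (some c) 1
            (by rw [pairsOkA_append, hpairs, hseq]; rfl)
            (by rw [runStateA_append, hrs]
                simp [stateOfB, hec, show ¬ maxc < 0 + 1 by omega, show ¬ maxc < 0 by omega,
                  show ¬ maxc ≤ 0 by omega])
            (by simp) (by intro _ _; omega)
          simp [hec, hgt, hrec, show ¬ maxc < 0 + 1 by omega, show ¬ maxc < 0 by omega,
            show ¬ maxc ≤ 0 by omega]
      | some l =>
        rw [isValidA, pairsOkA_append, hpairs, Bool.true_and, runLoopA_eq_isSome,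
          runStateA_append, hrs, hlast]
        have hrl : (1 : Int) ≤ run := hrun l rfl
        by_cases hb : (l, c) ∈ pvBannedPairsB banned_seqs
        · -- banned pair: both skip this chord
          have h1 : (!decide ([l, c] ∈ PySem.Set.ofList (banned_seqs.map PySem.Str.split₀))) = false := by
            simp [PySem.Set.mem_ofList, (mem_pvBannedPairsB banned_seqs l c).2, hb,
              (mem_pvBannedPairsB banned_seqs l c).1]
          simp only [h1]
          simp [hb]
        · have h1 : (!decide ([l, c] ∈ PySem.Set.ofList (banned_seqs.map PySem.Str.split₀))) = true := by
            have : ¬ ([l, c] ∈ banned_seqs.map PySem.Str.split₀) :=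
              fun h => hb ((mem_pvBannedPairsB banned_seqs l c).mpr h)
            simp [PySem.Set.mem_ofList, this]
          have h2 : decide ((l, c) ∈ pvBannedPairsB banned_seqs) = false := by simp [hb]
          simp only [h1]
          simp only [h2, Bool.true_and, Bool.false_eq_true, if_false, stateOfB, Option.bind_some]
          have hpx : pairsOkA (PySem.Set.ofList (banned_seqs.map PySem.Str.split₀)) (seq ++ [c]) = true := by
            rw [pairsOkA_append, hpairs, hlast]
            simp only [h1, Bool.true_and]
          have hgl : (seq ++ [c]).getLast? = some c := by simp
          cases hel : PySem.Chars.endswith l.toList ['m'] <;>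
            cases hec : PySem.Chars.endswith c.toList ['m']
          · -- l major, c major: run becomes run + 1
            by_cases hgt : run + 1 > maxc
            · simp [hel, hec, hgt, show maxc ≤ run by omega]
            · have hrec := ih (seq ++ [c]) (some c) (run + 1) hpx
                (by rw [runStateA_append, hrs]
                    simp [stateOfB, hel, hec, show ¬ maxc ≤ run by omega, show ¬ maxc < 0 by omega])
                hgl (by intro _ _; omega)
              simp [hel, hec, hgt, hrec, show ¬ maxc ≤ run by omega, show ¬ maxc < 0 by omega]
          · -- l major, c minor: run resets to 1
            by_cases hgt : (1 : Int) > maxc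
            · simp [hel, hec, hgt, show maxc < 0 + 1 by omega]
            · have hrec := ih (seq ++ [c]) (some c) 1 hpx
                (by rw [runStateA_append, hrs]
                    simp [stateOfB, hel, hec, show ¬ maxc < 0 + 1 by omega, show ¬ maxc < 0 by omega,
                      show ¬ maxc ≤ 0 by omega])
                hgl (by intro _ _; omega)
              simp [hel, hec, hgt, hrec, show ¬ maxc < 0 + 1 by omega, show ¬ maxc < 0 by omega,
                show ¬ maxc ≤ 0 by omega]
          · -- l minor, c major: run resets to 1
            by_cases hgt : (1 : Int) > maxc
            · simp [hel, hec, hgt, show maxc < 0 + 1 by omega]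
            · have hrec := ih (seq ++ [c]) (some c) 1 hpx
                (by rw [runStateA_append, hrs]
                    simp [stateOfB, hel, hec, show ¬ maxc < 0 + 1 by omega, show ¬ maxc < 0 by omega,
                      show ¬ maxc ≤ 0 by omega])
                hgl (by intro _ _; omega)
              simp [hel, hec, hgt, hrec, show ¬ maxc < 0 + 1 by omega, show ¬ maxc < 0 by omega,
                show ¬ maxc ≤ 0 by omega]
          · -- l minor, c minor: run becomes run + 1
            by_cases hgt : run + 1 > maxc
            · simp [hel, hec, hgt, show maxc ≤ run by omega]
            · have hrec := ih (seq ++ [c]) (some c) (run + 1) hpx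
                (by rw [runStateA_append, hrs]
                    simp [stateOfB, hel, hec, show ¬ maxc ≤ run by omega, show ¬ maxc < 0 by omega])
                hgl (by intro _ _; omega)
              simp [hel, hec, hgt, hrec, show ¬ maxc ≤ run by omega, show ¬ maxc < 0 by omega]

-- ===== VERDICT (by name: the statement is the Claim_ definition above) =====
theorem solution_spec : Claim_equal_solution := by
  intro banned_seqs max_consec _
  unfold Spec_solution solution solution_alt
  exact backtrack_eq banned_seqs max_consec 5 [] none 0 rfl rfl rfl (by intro l h; cases h)
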